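-- pv_equiv track=rewrite | github.com/ericcrn/ici | segundo-semestre/laboratorio/main.py | limpar_parrafo
-- ===== SOURCE A (Python) =====
-- GUIA = "ITEM\t\t\tCANTIDAD\tPRECIO UNITARIO"
--
-- def limpar_parrafo(parrafo): # Limpia el parrafo
--     en_parrafo = False
--     cant_precio = []
--
--     for linea in parrafo:
--         if linea == GUIA or en_parrafo:
--             en_parrafo = True
--             if linea == "":
--                 return cant_precio
--             else:
--                 if linea == GUIA:
--                     pass
--                 else:
--                     cant_precio.append(linea)
--     return cant_precio
-- ===== SOURCE B (Python) =====
-- GUIA = "ITEM\t\t\tCANTIDAD\tPRECIO UNITARIO"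
--
-- def limpar_parrafo(parrafo):
--     lineas = list(parrafo)
--     try:
--         inicio = lineas.index(GUIA) + 1
--     except ValueError:
--         return []
--     resto = lineas[inicio:]
--     try:
--         resto = resto[:resto.index("")]
--     except ValueError:
--         pass
--     return [l for l in resto if l != GUIA]
-- ===== Notes on version B (the rewrite author's own statement) =====
-- stated objective: idiomatic
-- what changed: Replaces A's boolean state-machine single pass (en_parrafo flag with nested branches and an accumulator) by a locate-then-collect structure: find the first GUIA with list.index, slice off everything after the first blank line, and filter out stray GUIA lines with a comprehension.
import Mathlib
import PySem

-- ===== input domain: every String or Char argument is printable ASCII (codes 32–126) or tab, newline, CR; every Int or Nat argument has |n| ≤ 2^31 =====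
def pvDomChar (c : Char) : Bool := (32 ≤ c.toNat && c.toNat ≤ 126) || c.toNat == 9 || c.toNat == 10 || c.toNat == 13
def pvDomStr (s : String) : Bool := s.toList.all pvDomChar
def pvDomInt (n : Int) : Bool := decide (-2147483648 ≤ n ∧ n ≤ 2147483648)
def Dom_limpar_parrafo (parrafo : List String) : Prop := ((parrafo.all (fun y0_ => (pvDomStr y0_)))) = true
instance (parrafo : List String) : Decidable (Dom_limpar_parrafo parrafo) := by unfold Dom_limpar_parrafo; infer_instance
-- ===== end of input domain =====

-- B replaces A's boolean state-machine single pass by a locate-then-collect structure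
-- (find GUIA, cut at the first blank line, filter stray GUIA lines); objective: idiomatic.

def pvGUIA : String := "ITEM\t\t\tCANTIDAD\tPRECIO UNITARIO"

-- ===== PORT A =====
-- the for-loop with its en_parrafo flag and cant_precio accumulator, branch for branch
def limparGoA (en : Bool) (acc : List String) : List String → List String
  | [] => acc
  | l :: rest =>
    if l == pvGUIA || en then
      if l == "" then acc
      else if l == pvGUIA then limparGoA true acc rest
      else limparGoA true (acc ++ [l]) rest
    else limparGoA en acc rest

def limpar_parrafo (parrafo : List String) : List String :=
  limparGoA false [] parrafo

-- ===== PORT B =====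
-- resto[:resto.index("")] guarded by the try/except ValueError
def cutBlank (xs : List String) : List String :=
  match PySem.List.index? xs "" with
  | none => xs
  | some j => PySem.List.slice xs none (some ((j : Int)))

def limpar_parrafo_alt (parrafo : List String) : List String :=
  match PySem.List.index? parrafo pvGUIA with
  | none => []
  | some i =>
    (cutBlank (PySem.List.slice parrafo (some ((i : Int) + 1)) none)).filter (fun l => l != pvGUIA)

-- ===== PRECONDITION & SPEC =====
def Spec_limpar_parrafo (parrafo : List String) (out : List String) : Prop := out = limpar_parrafo_alt parrafo
instance (parrafo : List String) (out : List String) : Decidable (Spec_limpar_parrafo parrafo out) := by unfold Spec_limpar_parrafo; infer_instance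

-- ===== CLAIM (what is proved, stated in full; the proofs are below) =====
def Claim_equal_limpar_parrafo : Prop := ∀ (parrafo : List String), Dom_limpar_parrafo parrafo → Spec_limpar_parrafo parrafo (limpar_parrafo parrafo)

-- ===== LEMMAS AND PROOFS =====

-- cutting at the first "" is takeWhile (· ≠ "")
theorem cut_eq_takeWhile (xs : List String) :
    cutBlank xs = xs.takeWhile (fun l => l != "") := by
  induction xs with
  | nil => simp [cutBlank, PySem.List.index?]
  | cons l rest ih =>
    by_cases hl : l = ""
    · subst hl
      unfold cutBlank
      rw [PySem.List.index?_cons_self]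
      simpa using PySem.List.slice_to_natCast ("" :: rest) 0
    · unfold cutBlank at *
      rw [PySem.List.index?_cons_of_ne rest hl]
      cases h : PySem.List.index? rest "" with
      | none =>
        rw [h] at ih
        simpa [List.takeWhile_cons, hl] using ih
      | some j =>
        rw [h] at ih
        simp only [Option.map_some,
          PySem.List.slice_to_natCast] at ih ⊢
        simp [List.take_succ_cons, hl, ih]

-- after the header the loop collects takeWhile-then-filter onto the accumulator
theorem goA_true (xs : List String) : ∀ acc,
    limparGoA true acc xs = acc ++ (xs.takeWhile (fun l => l != "")).filter (fun l => l != pvGUIA) := by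
  have hne : pvGUIA ≠ "" := by decide
  induction xs with
  | nil => simp [limparGoA]
  | cons l rest ih =>
    intro acc
    by_cases he : l = ""
    · subst he; simp [limparGoA]
    · by_cases hg : l = pvGUIA
      · subst hg
        simp [limparGoA, hne, ih]
      · simp [limparGoA, he, hg, ih]

theorem alt_cons_guia (rest : List String) :
    limpar_parrafo_alt (pvGUIA :: rest) = (rest.takeWhile (fun l => l != "")).filter (fun l => l != pvGUIA) := by
  unfold limpar_parrafo_alt
  rw [PySem.List.index?_cons_self]
  simp [cut_eq_takeWhile, PySem.List.slice_from_one]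

theorem alt_cons_of_ne (l : String) (rest : List String) (hl : l ≠ pvGUIA) :
    limpar_parrafo_alt (l :: rest) = limpar_parrafo_alt rest := by
  unfold limpar_parrafo_alt
  rw [PySem.List.index?_cons_of_ne rest hl]
  cases h : PySem.List.index? rest pvGUIA with
  | none => simp
  | some i =>
    have h2 : (((i : Nat) : Int) + 1) = (((i + 1 : Nat) : Int)) := by push_cast; ring
    have h1 : ((((i + 1 : Nat)) : Int) + 1) = (((i + 2 : Nat) : Int)) := by push_cast; ring
    simp only [Option.map_some, h2, h1, PySem.List.slice_from_natCast]
    simp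

theorem limpar_eq (parrafo : List String) :
    limpar_parrafo parrafo = limpar_parrafo_alt parrafo := by
  induction parrafo with
  | nil => simp [limpar_parrafo, limparGoA, limpar_parrafo_alt, PySem.List.index?]
  | cons l rest ih =>
    by_cases hg : l = pvGUIA
    · subst hg
      have hA : limpar_parrafo (pvGUIA :: rest) = limparGoA true [] rest := by
        simp [limpar_parrafo, limparGoA, show pvGUIA ≠ "" by decide]
      rw [hA, goA_true, alt_cons_guia]
      simp
    · have hA : limpar_parrafo (l :: rest) = limpar_parrafo rest := by
        simp [limpar_parrafo, limparGoA, hg]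
      rw [hA, ih, alt_cons_of_ne l rest hg]

-- ===== VERDICT (by name: the statement is the Claim_ definition above) =====
theorem limpar_parrafo_spec : Claim_equal_limpar_parrafo := by
  intro parrafo _
  unfold Spec_limpar_parrafo
  exact limpar_eq parrafo
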